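-- pv_equiv track=rewrite | github.com/Deepthi-Vemula/scaler-python | 5-hashing/homework_2.py | solve
-- ===== SOURCE A (Python) =====
-- def solve(A):
--     hashMap = {}
--     keys = []
--     for el in A:
--         if el in hashMap.keys():
--             hashMap[el] += 1
--         else:
--             hashMap[el] = 1
--             keys.append(el)
--     if len(keys)==2 and hashMap[keys[0]] == hashMap[keys[1]]:
--         return "WIN"
--     return "LOSE"
-- ===== SOURCE B (Python) =====
-- def solve(A):
--     s = sorted(A)
--     n = len(s)
--     if n >= 2 and n % 2 == 0 and s[0] == s[n // 2 - 1] and s[n // 2] == s[-1] and s[0] != s[n // 2]: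
--         return "WIN"
--     return "LOSE"
-- ===== Notes on version B (the rewrite author's own statement) =====
-- stated objective: alternative
-- what changed: Replaces the single-pass frequency dictionary plus first-occurrence key list with sort-then-boundary-checks: after sorting, the answer is WIN iff the length is even (>=2), each half is constant (first==middle-1 element and middle==last element) and the two halves differ.
import Mathlib
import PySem

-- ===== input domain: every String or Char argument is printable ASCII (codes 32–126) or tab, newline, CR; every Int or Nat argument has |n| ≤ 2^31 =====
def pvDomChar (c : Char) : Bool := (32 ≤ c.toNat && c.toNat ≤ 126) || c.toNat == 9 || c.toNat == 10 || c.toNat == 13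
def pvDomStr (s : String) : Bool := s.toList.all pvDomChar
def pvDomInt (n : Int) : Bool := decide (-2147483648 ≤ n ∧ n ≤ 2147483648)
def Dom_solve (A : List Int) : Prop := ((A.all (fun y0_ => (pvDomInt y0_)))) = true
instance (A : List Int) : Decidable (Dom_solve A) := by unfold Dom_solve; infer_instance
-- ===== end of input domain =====

-- B replaces A's single-pass frequency dictionary + parallel first-occurrence key list with
-- sort-then-boundary-checks: WIN iff the sorted list has even length ≥ 2, each half is constant
-- and the two halves differ (objective: alternative; no counting structure at all).

-- ===== PORT A =====
-- State is (hashMap, keys); hashMap[el] += 1 is insert el (getD el 0 + 1) — exact, since in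
-- that branch el is a key; hashMap[keys[0]]/[keys[1]] are read with getD/pyGetD — exact, since
-- Python's `and` only reaches them when len(keys)==2 and both are keys of hashMap.
def solve (A : List Int) : String :=
  let st := A.foldl
    (fun s el =>
      if s.1.contains el then (s.1.insert el (s.1.getD el 0 + 1), s.2)
      else (s.1.insert el 1, s.2 ++ [el]))
    ((PySem.Dict.empty : PySem.Dict Int Int), ([] : List Int))
  if st.2.length == 2 &&
     st.1.getD (PySem.List.pyGetD st.2 0 0) 0 == st.1.getD (PySem.List.pyGetD st.2 1 0) 0
  then "WIN" else "LOSE"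

-- ===== PORT B =====
-- s[0], s[n//2-1], s[n//2], s[-1] are read with pyGetD — exact, since Python's `and`
-- short-circuits: the indexings are only reached when n ≥ 2 and n is even.
def solve_alt (A : List Int) : String :=
  let s := PySem.List.sorted A (fun x => x) false
  let n : Int := s.length
  if 2 ≤ n ∧ PySem.Int.mod n 2 = 0 ∧
     PySem.List.pyGetD s 0 0 = PySem.List.pyGetD s (PySem.Int.floordiv n 2 - 1) 0 ∧
     PySem.List.pyGetD s (PySem.Int.floordiv n 2) 0 = PySem.List.pyGetD s (-1) 0 ∧
     PySem.List.pyGetD s 0 0 ≠ PySem.List.pyGetD s (PySem.Int.floordiv n 2) 0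
  then "WIN" else "LOSE"

-- ===== PRECONDITION & SPEC =====
def Spec_solve (A : List Int) (out : String) : Prop := out = solve_alt A
instance (A : List Int) (out : String) : Decidable (Spec_solve A out) := by unfold Spec_solve; infer_instance

-- ===== CLAIM (what is proved, stated in full; the proofs are below) =====
def Claim_equal_solve : Prop := ∀ (A : List Int), Dom_solve A → Spec_solve A (solve A)

-- ===== LEMMAS AND PROOFS =====

-- A's loop state is (running counter, distinct elements seen so far in first-occurrence order).
theorem solve_state_inv (l : List Int) (d : PySem.Dict Int Int) (ks : List Int)
    (h : ks = d.keys) :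
    l.foldl
      (fun s el =>
        if s.1.contains el then (s.1.insert el (s.1.getD el 0 + 1), s.2)
        else (s.1.insert el 1, s.2 ++ [el]))
      (d, ks)
    = (l.foldl (fun d x => d.insert x (d.getD x 0 + 1)) d, PySem.Set.update ks l) := by
  induction l generalizing d ks with
  | nil => simp [PySem.Set.update]
  | cons el t ih =>
    simp only [List.foldl_cons]
    by_cases hc : d.contains el = true
    · have hmem : el ∈ ks := by
        rw [h]; exact (PySem.Dict.contains_iff_mem_keys d el).mp hc
      rw [if_pos hc, ih _ _ (by rw [h, PySem.Dict.keys_insert_of_contains d _ hc])]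
      have : PySem.Set.update ks (el :: t) = PySem.Set.update (PySem.Set.add ks el) t := rfl
      rw [this, show PySem.Set.add ks el = ks by
        simp [PySem.Set.add]; exact hmem]
    · have hc' : d.contains el = false := by simpa using hc
      have hnm : el ∉ ks := by
        rw [h]; intro hm; exact hc ((PySem.Dict.contains_iff_mem_keys d el).mpr hm)
      rw [if_neg hc,
        show d.insert el 1 = d.insert el (d.getD el 0 + 1) by
          rw [PySem.Dict.getD_of_not_contains d _ hc']; norm_num,
        ih _ _ (by rw [h, PySem.Dict.keys_insert_of_not_contains d _ hc'])]
      have : PySem.Set.update ks (el :: t) = PySem.Set.update (PySem.Set.add ks el) t := rfl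
      rw [this, show PySem.Set.add ks el = ks ++ [el] by
        simp [PySem.Set.add]; exact hnm]


theorem nodup_pair_eq (l : List Int) (c d : Int) (hcd : c ≠ d) (hnd : l.Nodup)
    (hmem : ∀ x, x ∈ l ↔ (x = c ∨ x = d)) : l = [c, d] ∨ l = [d, c] := by
  match l, hnd with
  | [], _ => exact absurd ((hmem c).mpr (Or.inl rfl)) (by simp)
  | [x], _ =>
    have hc := (hmem c).mpr (Or.inl rfl)
    have hd := (hmem d).mpr (Or.inr rfl)
    simp at hc hd; exact absurd (hc.trans hd.symm) hcd
  | [x, y], hnd =>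
    have hx := (hmem x).mp (by simp)
    have hy := (hmem y).mp (by simp)
    have hxy : x ≠ y := by simp at hnd; exact hnd
    rcases hx with rfl | rfl <;> rcases hy with rfl | rfl <;> simp_all
  | x :: y :: z :: t, hnd =>
    have hx := (hmem x).mp (by simp)
    have hy := (hmem y).mp (by simp)
    have hz := (hmem z).mp (by simp)
    simp [List.nodup_cons] at hnd
    rcases hx with rfl | rfl <;> rcases hy with rfl | rfl <;> rcases hz with rfl | rfl <;>
      simp_all

theorem sorted_two_blocks (A : List Int) (a b : Int) (hab : a < b)
    (hA : ∀ x ∈ A, x = a ∨ x = b) (hcnt : A.count a = A.count b) :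
    PySem.List.sorted A (fun x => x) false
      = List.replicate (A.count a) a ++ List.replicate (A.count a) b := by
  apply PySem.List.sorted_id_eq_of_perm_of_pairwise
  · rw [List.perm_iff_count]
    intro x
    rw [List.count_append, List.count_replicate, List.count_replicate]
    by_cases hxa : x = a
    · simp [hxa, hab.ne']
    · by_cases hxb : x = b
      · simp [hxb, hab.ne, hcnt]
      · have hnm : x ∉ A := fun hm => by rcases hA x hm with h | h <;> simp_all
        simp [Ne.symm hxa, Ne.symm hxb, List.count_eq_zero.mpr hnm]
  · rw [List.pairwise_append]
    refine ⟨List.pairwise_replicate.mpr (by simp), List.pairwise_replicate.mpr (by simp), ?_⟩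
    intro x hx y hy
    rw [List.eq_of_mem_replicate hx, List.eq_of_mem_replicate hy]
    exact hab.le

def Acond (A : List Int) : Bool :=
  let ks := PySem.Set.ofList A
  ks.length == 2 &&
    (PySem.Dict.counter A).getD (PySem.List.pyGetD ks 0 0) 0 ==
      (PySem.Dict.counter A).getD (PySem.List.pyGetD ks 1 0) 0

def Bcond (A : List Int) : Prop :=
  let s := PySem.List.sorted A (fun x => x) false
  let n : Int := s.length
  2 ≤ n ∧ PySem.Int.mod n 2 = 0 ∧
  PySem.List.pyGetD s 0 0 = PySem.List.pyGetD s (PySem.Int.floordiv n 2 - 1) 0 ∧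
  PySem.List.pyGetD s (PySem.Int.floordiv n 2) 0 = PySem.List.pyGetD s (-1) 0 ∧
  PySem.List.pyGetD s 0 0 ≠ PySem.List.pyGetD s (PySem.Int.floordiv n 2) 0

theorem bcond_of_blocks (A : List Int) (k : Nat) (hk : 0 < k) (c d : Int) (hcd : c ≠ d)
    (hs : PySem.List.sorted A (fun x => x) false
        = List.replicate k c ++ List.replicate k d) : Bcond A := by
  unfold Bcond
  simp only [hs]
  have hlen : (List.replicate k c ++ List.replicate k d).length = k + k := by simp
  have h2 : ¬ ((2:Int) = 0) := by norm_num
  have hfd : PySem.Int.floordiv ((k + k : Nat) : Int) 2 = (k : Int) := by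
    rw [PySem.Int.floordiv_eq_ediv_of_pos (by norm_num)]; push_cast; omega
  rw [hlen]
  refine ⟨by push_cast; omega, ?_, ?_, ?_, ?_⟩
  · rw [PySem.Int.mod_eq_zero_iff_dvd]; exact ⟨(k : Int), by push_cast; ring⟩
  · rw [hfd, show ((k : Int) - 1) = ((k - 1 : Nat) : Int) by omega,
      PySem.List.pyGetD_natCast, PySem.List.pyGetD_zero]
    rw [List.getD_eq_getElem _ _ (by simp; omega), List.getD_eq_getElem _ _ (by simp; omega)]
    rw [List.getElem_append_left (by simp; omega), List.getElem_append_left (by simp; omega)]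
    simp
  · rw [hfd, PySem.List.pyGetD_natCast,
      PySem.List.pyGetD_neg_ofNat (List.replicate k c ++ List.replicate k d) 1 0
        (by norm_num) (by simp; omega)]
    rw [List.getD_eq_getElem _ _ (by simp; omega)]
    rw [List.getElem_append_right (by simp)]
    rw [List.getElem_append_right (by simp; omega)]
    simp
  · rw [hfd, PySem.List.pyGetD_natCast, PySem.List.pyGetD_zero]
    rw [List.getD_eq_getElem _ _ (by simp; omega), List.getD_eq_getElem _ _ (by simp; omega)]
    rw [List.getElem_append_left (by simp; omega), List.getElem_append_right (by simp)]
    simpa using hcd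

theorem acond_of_blocks (A : List Int) (k : Nat) (hk : 0 < k) (c d : Int) (hcd : c ≠ d)
    (hs : PySem.List.sorted A (fun x => x) false
        = List.replicate k c ++ List.replicate k d) : Acond A = true := by
  have hmemA : ∀ x, x ∈ A ↔ (x = c ∨ x = d) := by
    intro x
    rw [← PySem.List.mem_sorted (key := fun x => x) (rev := false), hs]
    simp [List.mem_replicate, hk.ne']
  have hcount : ∀ x, A.count x = ((List.replicate k c ++ List.replicate k d).count x) := by
    intro x
    have h' := (PySem.List.sorted_perm A (fun x => x) false).count_eq x
    rw [hs] at h'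
    exact h'.symm
  have hcc : A.count c = k := by
    rw [hcount]; simp [List.count_replicate, Ne.symm hcd]
  have hcd' : A.count d = k := by
    rw [hcount]; simp [List.count_replicate, hcd]
  have hks := nodup_pair_eq (PySem.Set.ofList A) c d hcd (PySem.Set.nodup_ofList A)
    (fun x => (PySem.Set.mem_ofList A x).trans (hmemA x))
  unfold Acond
  rcases hks with h | h <;>
    simp only [h] <;>
    simp [PySem.List.pyGetD_zero_cons, PySem.Dict.getD_counter, hcc, hcd',
      show PySem.List.pyGetD [c, d] 1 0 = d from rfl,
      show PySem.List.pyGetD [d, c] 1 0 = c from rfl]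

theorem blocks_of_acond (A : List Int) (h : Acond A = true) :
    ∃ (k : Nat) (c d : Int), 0 < k ∧ c ≠ d ∧
      PySem.List.sorted A (fun x => x) false
        = List.replicate k c ++ List.replicate k d := by
  unfold Acond at h
  simp only [Bool.and_eq_true, beq_iff_eq] at h
  obtain ⟨hlen, hcnt⟩ := h
  rcases hks : PySem.Set.ofList A with _ | ⟨a, _ | ⟨b, _ | ⟨e, t⟩⟩⟩ <;>
    rw [hks] at hlen <;> simp at hlen
  rw [hks] at hcnt
  have hab : a ≠ b := by
    have := PySem.Set.nodup_ofList A
    rw [hks] at this; simp at this; exact this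
  have hmemA : ∀ x, x ∈ A ↔ (x = a ∨ x = b) := by
    intro x
    rw [← PySem.Set.mem_ofList A x, hks]; simp
  have hcc : A.count a = A.count b := by
    have : ((A.count a : Int)) = ((A.count b : Int)) := by
      simpa [PySem.Dict.getD_counter,
        show PySem.List.pyGetD [a, b] 0 0 = a from rfl,
        show PySem.List.pyGetD [a, b] 1 0 = b from rfl] using hcnt
    exact_mod_cast this
  have hka : 0 < A.count a :=
    List.count_pos_iff.mpr ((hmemA a).mpr (Or.inl rfl))
  rcases lt_or_gt_of_ne hab with hlt | hgt
  · exact ⟨A.count a, a, b, hka, hab,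
      sorted_two_blocks A a b hlt (fun x hx => hmemA x |>.mp hx) hcc⟩
  · refine ⟨A.count b, b, a, hcc ▸ hka, hab.symm, ?_⟩
    exact sorted_two_blocks A b a hgt
      (fun x hx => ((hmemA x).mp hx).symm) hcc.symm

theorem blocks_of_bcond (A : List Int) (h : Bcond A) :
    ∃ (k : Nat) (c d : Int), 0 < k ∧ c ≠ d ∧
      PySem.List.sorted A (fun x => x) false
        = List.replicate k c ++ List.replicate k d := by
  unfold Bcond at h
  set s := PySem.List.sorted A (fun x => x) false with hsdef
  obtain ⟨h2, hmod, hfirst, hsecond, hne⟩ := h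
  have hdvd : (2 : Int) ∣ (s.length : Int) := (PySem.Int.mod_eq_zero_iff_dvd _ _).mp hmod
  have hk2 : ∃ k : Nat, s.length = 2 * k ∧ 0 < k := by
    obtain ⟨m, hm⟩ := hdvd
    exact ⟨m.toNat, by omega, by omega⟩
  obtain ⟨k, hnn, hk⟩ := hk2
  have hfd : PySem.Int.floordiv ((s.length : Nat) : Int) 2 = (k : Int) := by
    rw [PySem.Int.floordiv_eq_ediv_of_pos (by norm_num)]; omega
  rw [hfd] at hfirst hsecond hne
  rw [show ((k : Int) - 1) = ((k - 1 : Nat) : Int) by omega] at hfirst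
  rw [PySem.List.pyGetD_zero] at hfirst hne
  rw [PySem.List.pyGetD_natCast] at hfirst hsecond hne
  rw [PySem.List.pyGetD_neg_ofNat s 1 0 (by norm_num) (by omega)] at hsecond
  rw [List.getD_eq_getElem _ _ (by omega), List.getD_eq_getElem _ _ (by omega)] at hfirst
  rw [List.getD_eq_getElem _ _ (by omega)] at hsecond
  rw [List.getD_eq_getElem _ _ (by omega), List.getD_eq_getElem _ _ (by omega)] at hne
  have hmono : ∀ (p q : Nat), (hpq : p ≤ q) → (hq : q < s.length) →
      s[p]'(by omega) ≤ s[q]'hq := by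
    intro p q hpq hq
    exact PySem.List.sorted_id_getElem_mono (xs := A) hpq hq
  have hval : ∀ (i : Nat) (hi : i < s.length),
      s[i]'hi = if i < k then s[0]'(by omega) else s[k]'(by omega) := by
    intro i hi
    by_cases hik : i < k
    · rw [if_pos hik]
      refine le_antisymm ?_ (hmono 0 i (by omega) hi)
      calc s[i]'hi ≤ s[k-1]'(by omega) := hmono i (k-1) (by omega) (by omega)
        _ = s[0]'(by omega) := by
            have := hfirst; simp at this ⊢; omega
    · rw [if_neg hik]
      refine le_antisymm ?_ (hmono k i (by omega) hi)
      calc s[i]'hi ≤ s[s.length - 1]'(by omega) := hmono i (s.length - 1) (by omega) (by omega)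
        _ = s[k]'(by omega) := by
            have := hsecond; simp at this ⊢; omega
  refine ⟨k, s[0]'(by omega), s[k]'(by omega), hk, by simpa using hne, ?_⟩
  apply List.ext_getElem
  · simp; omega
  · intro i hi1 hi2
    rw [hval i hi1]
    by_cases hik : i < k
    · rw [if_pos hik, List.getElem_append_left (by simpa using hik)]
      simp
    · rw [if_neg hik, List.getElem_append_right (by simpa using hik)]
      simp

theorem cond_iff (A : List Int) : Acond A = true ↔ Bcond A := by
  constructor
  · intro h
    obtain ⟨k, c, d, hk, hcd, hs⟩ := blocks_of_acond A h
    exact bcond_of_blocks A k hk c d hcd hs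
  · intro h
    obtain ⟨k, c, d, hk, hcd, hs⟩ := blocks_of_bcond A h
    exact acond_of_blocks A k hk c d hcd hs

-- ===== VERDICT (by name: the statement is the Claim_ definition above) =====
theorem solve_spec : Claim_equal_solve := by
  intro A _
  unfold Spec_solve solve solve_alt
  rw [solve_state_inv A PySem.Dict.empty [] (by simp [PySem.Dict.keys_empty])]
  have hset : PySem.Set.update ([] : List Int) A = PySem.Set.ofList A := rfl
  have hcnt : A.foldl (fun d x => d.insert x (d.getD x 0 + 1)) PySem.Dict.empty
      = PySem.Dict.counter A := PySem.Dict.foldl_insert_getD_add_one_eq_counter A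
  simp only [hset, hcnt]
  have h := cond_iff A
  unfold Acond Bcond at h
  simp only at h ⊢
  split_ifs with h1 h2 h2
  · rfl
  · exact absurd (h.mp h1) h2
  · exact absurd (h.mpr h2) h1
  · rfl
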